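-- pv_equiv track=rewrite | github.com/JENLISA4EVER/LLM_adaptive_dyg | run_recall.py | get_structural_nodes
-- ===== SOURCE A (Python) =====
-- from collections import defaultdict
--
-- def get_structural_nodes(
--     q_head_id: int,
--     top_k: int,
--     adj: defaultdict[int, set]
-- ) -> list:
--     """
--     【优化版】
--     接收一个已经构建好的邻接表，避免对全部历史事件的重复扫描和构建。
--     """
--     if q_head_id not in adj:
--         return []
--     q_head_neighbors = adj[q_head_id]
--
--     common_neighbors_count = []
--     # 遍历图中所有节点，寻找共同邻居
--     for node_id in adj.keys():
--         if node_id == q_head_id or node_id in q_head_neighbors: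
--             continue
--         count = len(q_head_neighbors.intersection(adj[node_id]))
--         if count > 0:
--             common_neighbors_count.append((node_id, count))
--
--     common_neighbors_count.sort(key=lambda item: item[1], reverse=True)
--     return common_neighbors_count[:top_k]
-- ===== SOURCE B (Python) =====
-- def get_structural_nodes(q_head_id, top_k, adj):
--     # Two-hop counting: build a reverse index (neighbor -> source nodes) once,
--     # then count common neighbors by walking only the two-hop edges.
--     if q_head_id not in adj:
--         return []
--     q_nb = adj[q_head_id]
--
--     rev = {}
--     for node_id, nbrs in adj.items():
--         for m in nbrs:
--             rev.setdefault(m, []).append(node_id)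
--
--     counts = {}
--     for m in q_nb:
--         for x in rev.get(m, ()):
--             counts[x] = counts.get(x, 0) + 1
--
--     result = [(node_id, counts.get(node_id, 0)) for node_id in adj
--               if node_id != q_head_id and node_id not in q_nb
--               and counts.get(node_id, 0) > 0]
--     result.sort(key=lambda t: t[1], reverse=True)
--     return result[:top_k]
-- ===== Notes on version B (the rewrite author's own statement) =====
-- stated objective: alternative
-- what changed: Replaces the per-node set-intersection scan with a two-hop count: build a reverse adjacency index once, then accumulate common-neighbor counts by walking only the query's neighbors' in-edges, emitting candidates in adj-key order before the same stable sort.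
import Mathlib
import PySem

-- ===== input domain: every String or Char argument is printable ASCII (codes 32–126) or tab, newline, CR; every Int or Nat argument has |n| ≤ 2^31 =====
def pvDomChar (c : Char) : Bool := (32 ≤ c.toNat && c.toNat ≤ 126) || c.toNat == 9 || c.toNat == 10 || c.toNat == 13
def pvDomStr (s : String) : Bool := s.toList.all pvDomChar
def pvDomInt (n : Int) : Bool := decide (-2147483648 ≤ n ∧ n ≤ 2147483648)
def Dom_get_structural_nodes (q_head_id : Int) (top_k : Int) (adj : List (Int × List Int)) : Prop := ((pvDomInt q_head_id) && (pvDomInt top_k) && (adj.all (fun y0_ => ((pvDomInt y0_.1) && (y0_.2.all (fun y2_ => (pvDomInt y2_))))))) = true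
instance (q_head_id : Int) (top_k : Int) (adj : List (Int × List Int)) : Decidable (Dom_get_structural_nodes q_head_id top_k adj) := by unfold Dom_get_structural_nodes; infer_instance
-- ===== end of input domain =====

-- B replaces A's per-node set-intersection scan by a reverse adjacency index and two-hop
-- counting (an alternative algorithm, same return value; not claimed faster).

-- ===== PORT A =====
def get_structural_nodes (q_head_id : Int) (top_k : Int) (adj : List (Int × List Int)) : List (Int × Int) :=
  let d := PySem.Dict.ofList adj
  if !(d.contains q_head_id) then [] else
  let q_head_neighbors : PySem.Set Int := PySem.Set.ofList (d.getD q_head_id [])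
  let common_neighbors_count := d.keys.foldl (fun acc node_id =>
    if node_id == q_head_id || q_head_neighbors.contains node_id then acc
    else
      let count := PySem.Set.len (PySem.Set.inter q_head_neighbors (PySem.Set.ofList (d.getD node_id [])))
      if count > 0 then acc ++ [(node_id, count)] else acc) []
  PySem.List.slice (PySem.List.sorted common_neighbors_count (fun item => item.2) true) none (some top_k)

-- ===== PORT B =====
def get_structural_nodes_alt (q_head_id : Int) (top_k : Int) (adj : List (Int × List Int)) : List (Int × Int) :=
  let d := PySem.Dict.ofList adj
  if !(d.contains q_head_id) then [] else
  let q_nb : PySem.Set Int := PySem.Set.ofList (d.getD q_head_id [])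
  -- rev.setdefault(m, []).append(node_id)  ≡  modify m [] (· ++ [node_id])
  let rev : PySem.Dict Int (List Int) := d.items.foldl (fun r p =>
      (PySem.Set.ofList p.2).foldl (fun r m => r.modify m [] (fun l => l ++ [p.1])) r) PySem.Dict.empty
  let counts : PySem.Dict Int Int := q_nb.foldl (fun c m =>
      (rev.getD m []).foldl (fun c x => c.modify x 0 (· + 1)) c) PySem.Dict.empty
  let result := d.keys.foldl (fun acc node_id =>
      if node_id ≠ q_head_id ∧ ¬ (q_nb.contains node_id = true) ∧ counts.getD node_id 0 > 0
      then acc ++ [(node_id, counts.getD node_id 0)] else acc) []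
  PySem.List.slice (PySem.List.sorted result (fun t => t.2) true) none (some top_k)

-- ===== PRECONDITION & SPEC =====
def Spec_get_structural_nodes (q_head_id : Int) (top_k : Int) (adj : List (Int × List Int)) (out : List (Int × Int)) : Prop := out = get_structural_nodes_alt q_head_id top_k adj
instance (q_head_id : Int) (top_k : Int) (adj : List (Int × List Int)) (out : List (Int × Int)) : Decidable (Spec_get_structural_nodes q_head_id top_k adj out) := by unfold Spec_get_structural_nodes; infer_instance

-- ===== CLAIM (what is proved, stated in full; the proofs are below) =====
def Claim_equal_get_structural_nodes : Prop := ∀ (q_head_id : Int) (top_k : Int) (adj : List (Int × List Int)), Dom_get_structural_nodes q_head_id top_k adj → Spec_get_structural_nodes q_head_id top_k adj (get_structural_nodes q_head_id top_k adj)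

-- ===== LEMMAS AND PROOFS =====

-- the inner rev-building fold over a Nodup list appends x to exactly the buckets of its members
theorem pv_rev_inner (t : List Int) (ht : t.Nodup) (r : PySem.Dict Int (List Int)) (x m : Int) :
    ((t.foldl (fun r m' => r.modify m' [] (fun l => l ++ [x])) r).getD m []) =
      r.getD m [] ++ (if m ∈ t then [x] else []) := by
  induction t generalizing r with
  | nil => simp
  | cons a t ih =>
    simp only [List.foldl_cons]
    rw [ih (by exact ht.of_cons)]
    rw [PySem.Dict.getD_modify]
    by_cases hma : m = a
    · subst hma
      have : m ∉ t := (List.nodup_cons.mp ht).1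
      simp [this]
    · simp [hma, List.mem_cons]

-- the rev dict: bucket m holds the first components of the items whose value list contains m
theorem pv_rev_fold (L : List (Int × List Int)) (r : PySem.Dict Int (List Int)) (m : Int) :
    ((L.foldl (fun r p => (PySem.Set.ofList p.2).foldl (fun r m' => r.modify m' [] (fun l => l ++ [p.1])) r) r).getD m []) =
      r.getD m [] ++ (L.filter (fun p => decide (m ∈ p.2))).map (·.1) := by
  induction L generalizing r with
  | nil => simp
  | cons p L ih =>
    simp only [List.foldl_cons]
    rw [ih]
    rw [pv_rev_inner _ (PySem.Set.nodup_ofList p.2)]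
    by_cases hm : m ∈ p.2
    · simp [hm, PySem.Set.mem_ofList]
    · simp [hm, PySem.Set.mem_ofList]

-- the counting fold: final count of x is the sum over ms of x's multiplicity in g m
theorem pv_count_fold (g : Int → List Int) (ms : List Int) (c : PySem.Dict Int Int) (x : Int) :
    ((ms.foldl (fun c m => (g m).foldl (fun c x => c.modify x 0 (· + 1)) c) c).getD x 0) =
      c.getD x 0 + ((ms.map (fun m => ((g m).count x : Int))).sum) := by
  induction ms generalizing c with
  | nil => simp
  | cons m ms ih =>
    simp only [List.foldl_cons, List.map_cons, List.sum_cons]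
    rw [ih, PySem.Dict.getD_foldl_modify_add_one]
    ring

-- multiplicity of a key x in bucket m of the rev dict built from d.items (keys Nodup)
theorem pv_count_bucket (d : PySem.Dict Int (List Int)) (hnd : d.keys.Nodup) (x m : Int)
    (hx : x ∈ d.keys) :
    ((d.items.filter (fun p => decide (m ∈ p.2))).map (·.1)).count x =
      (if m ∈ d.getD x [] then 1 else 0) := by
  rw [PySem.Dict.items_eq_map_keys d hnd []]
  rw [List.filter_map]
  rw [List.map_map]
  have hcomp : ((fun p : Int × List Int => p.1) ∘ (fun k => (k, d.getD k []))) = id := rfl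
  rw [hcomp, List.map_id]
  by_cases hmem : m ∈ d.getD x []
  · rw [List.count_filter (by simp [hmem])]
    simp [hmem, List.count_eq_one_of_mem hnd hx]
  · simp only [hmem, if_false]
    rw [List.count_eq_zero]
    intro hin
    exact hmem (by simpa using (List.of_mem_filter hin))

-- the central count equality: B's counter agrees with A's intersection size on every key of d
theorem pv_counts_eq (d : PySem.Dict Int (List Int)) (hnd : d.keys.Nodup)
    (qn : PySem.Set Int) (node : Int) (hnode : node ∈ d.keys) :
    ((qn.foldl (fun c m =>
        (((d.items.foldl (fun r p => (PySem.Set.ofList p.2).foldl (fun r m' => r.modify m' [] (fun l => l ++ [p.1])) r) PySem.Dict.empty)).getD m []).foldl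
          (fun c x => c.modify x 0 (· + 1)) c) PySem.Dict.empty).getD node 0) =
      PySem.Set.len (PySem.Set.inter qn (PySem.Set.ofList (d.getD node []))) := by
  rw [pv_count_fold (fun m => ((d.items.foldl (fun r p => (PySem.Set.ofList p.2).foldl (fun r m' => r.modify m' [] (fun l => l ++ [p.1])) r) PySem.Dict.empty)).getD m [])]
  rw [PySem.Dict.getD_empty]
  have hb : ∀ m : Int, (((d.items.foldl (fun r p => (PySem.Set.ofList p.2).foldl (fun r m' => r.modify m' [] (fun l => l ++ [p.1])) r) PySem.Dict.empty)).getD m []).count node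
      = (if (fun m => decide (m ∈ PySem.Set.ofList (d.getD node []))) m = true then (1:Nat) else 0) := by
    intro m
    rw [pv_rev_fold, PySem.Dict.getD_empty, List.nil_append]
    rw [pv_count_bucket d hnd node m hnode]
    simp [PySem.Set.mem_ofList]
  have hmap : qn.map (fun m => ((((d.items.foldl (fun r p => (PySem.Set.ofList p.2).foldl (fun r m' => r.modify m' [] (fun l => l ++ [p.1])) r) PySem.Dict.empty)).getD m []).count node : Int))
      = qn.map (fun m => if (fun m => decide (m ∈ PySem.Set.ofList (d.getD node []))) m = true then (1:Int) else 0) := by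
    apply List.map_congr_left
    intro m _
    rw [hb m]
    split_ifs <;> simp
  rw [hmap, PySem.List.sum_map_ite_one_zero]
  unfold PySem.Set.len PySem.Set.inter
  rw [List.countP_eq_length_filter, zero_add]
  have hfilt : List.filter (fun m => decide (m ∈ PySem.Set.ofList (d.getD node []))) qn
      = List.filter (fun x => (PySem.Set.ofList (d.getD node [])).contains x) qn := by
    apply List.filter_congr
    intro m _
    simp [List.contains_eq_mem]
  rw [hfilt]

-- ===== VERDICT (by name: the statement is the Claim_ definition above) =====
theorem get_structural_nodes_spec : Claim_equal_get_structural_nodes := by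
  intro q_head_id top_k adj _
  unfold Spec_get_structural_nodes get_structural_nodes get_structural_nodes_alt
  cases hc : (PySem.Dict.ofList adj).contains q_head_id with
  | false => simp only [hc, Bool.not_false, if_pos]
  | true =>
    simp only [hc, Bool.not_true, Bool.false_eq_true, if_false]
    apply congrArg (fun l : List (Int × Int) =>
      PySem.List.slice (PySem.List.sorted l (fun t => t.2) true) none (some top_k))
    apply PySem.List.foldl_congr_mem
    intro acc node hnode
    rw [pv_counts_eq (PySem.Dict.ofList adj) (PySem.Dict.nodup_keys_ofList adj) _ node hnode]
    by_cases h1 : node = q_head_id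
    · simp [h1]
    · by_cases h2 : node ∈ (PySem.Dict.ofList adj).getD q_head_id []
      · simp [h1, h2]
      · simp [h1, h2]
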